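-- pv_equiv track=rewrite | github.com/universalpl/infa | zadania maturalne/matura_próbna_3.5.py | chuj
-- ===== SOURCE A (Python) =====
-- def chuj(M, a, b):
--     k = 0
--     for x in range(0, M):
--         if (a ** x) % M == b:
--             k += 1
--     if k > 0:
--         return True
--     else:
--         return False
-- ===== SOURCE B (Python) =====
-- def chuj(M, a, b):
--     if M <= 0:
--         return False
--     r = 1 % M
--     for _ in range(M):
--         if r == b:
--             return True
--         r = r * a % M
--     return False
-- ===== Notes on version B (the rewrite author's own statement) =====
-- stated objective: faster
-- what changed: Replaces computing the huge power a**x from scratch each iteration with a running product kept reduced mod M, and returns immediately on the first hit instead of counting all hits.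
import Mathlib
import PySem

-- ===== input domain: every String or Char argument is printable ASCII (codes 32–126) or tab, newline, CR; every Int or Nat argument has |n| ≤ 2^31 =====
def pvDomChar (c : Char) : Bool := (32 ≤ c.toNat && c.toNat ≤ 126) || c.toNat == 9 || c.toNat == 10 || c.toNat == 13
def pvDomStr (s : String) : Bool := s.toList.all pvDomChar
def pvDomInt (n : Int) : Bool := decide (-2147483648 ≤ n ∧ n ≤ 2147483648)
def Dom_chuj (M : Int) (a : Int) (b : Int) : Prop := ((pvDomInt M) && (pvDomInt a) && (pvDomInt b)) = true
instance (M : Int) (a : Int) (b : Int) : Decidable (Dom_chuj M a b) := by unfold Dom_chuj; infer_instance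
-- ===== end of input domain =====

-- B replaces A's per-iteration huge power (a ** x) % M by a running product reduced mod M with an
-- early return on the first hit (objective: faster, asymptotic).

-- ===== PORT A =====
-- for x in range(0, M): if (a ** x) % M == b: k += 1;  then k > 0
def chuj (M : Int) (a : Int) (b : Int) : Bool :=
  let k : Int :=
    (PySem.List.pyRange 0 M 1).foldl
      (fun k x => if PySem.Int.mod (a ^ x.toNat) M = b then k + 1 else k) 0
  if k > 0 then true else false

-- ===== PORT B =====
-- the loop of Source B: n iterations left, r is the running value a^x % M; early exit on r == b
def chujAltGo (M : Int) (a : Int) (b : Int) : Nat → Int → Bool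
  | 0, _ => false
  | n + 1, r => if r = b then true else chujAltGo M a b n (PySem.Int.mod (r * a) M)

def chuj_alt (M : Int) (a : Int) (b : Int) : Bool :=
  if M ≤ 0 then false
  else chujAltGo M a b M.toNat (PySem.Int.mod 1 M)

-- ===== PRECONDITION & SPEC =====
def Spec_chuj (M : Int) (a : Int) (b : Int) (out : Bool) : Prop := out = chuj_alt M a b
instance (M : Int) (a : Int) (b : Int) (out : Bool) : Decidable (Spec_chuj M a b out) := by unfold Spec_chuj; infer_instance

-- ===== CLAIM (what is proved, stated in full; the proofs are below) =====
def Claim_equal_chuj : Prop := ∀ (M : Int) (a : Int) (b : Int), Dom_chuj M a b → Spec_chuj M a b (chuj M a b)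

-- ===== LEMMAS AND PROOFS =====

-- A's counting fold is k plus the number of hits
theorem foldl_count_eq (p : Int → Prop) [DecidablePred p] (l : List Int) (k : Int) :
    l.foldl (fun k x => if p x then k + 1 else k) k = k + (l.countP (fun x => decide (p x)) : Int) := by
  induction l generalizing k with
  | nil => simp
  | cons y t ih =>
      by_cases h : p y <;> simp [List.foldl_cons, h, ih] <;> ring

-- Python mod congruence under multiplication, for a positive modulus
theorem mod_mul_step (M x y : Int) (hM : 0 < M) :
    PySem.Int.mod (PySem.Int.mod x M * y) M = PySem.Int.mod (x * y) M := by
  simp only [PySem.Int.mod_eq_emod_of_pos hM]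
  rw [Int.mul_emod, Int.emod_emod_of_dvd _ dvd_rfl, ← Int.mul_emod]

-- B's loop finds a hit iff some remaining exponent hits
theorem chujAltGo_iff (M a b : Int) (hM : 0 < M) :
    ∀ (n : Nat) (j : Nat),
      chujAltGo M a b n (PySem.Int.mod (a ^ j) M) = true ↔
        ∃ i : Nat, i < n ∧ PySem.Int.mod (a ^ (j + i)) M = b := by
  intro n
  induction n with
  | zero => intro j; simp [chujAltGo]
  | succ n ih =>
      intro j
      by_cases h : PySem.Int.mod (a ^ j) M = b
      · simp only [chujAltGo, h]
        constructor
        · intro _; exact ⟨0, Nat.succ_pos n, by simpa using h⟩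
        · intro _; rfl
      · have hstep : PySem.Int.mod (PySem.Int.mod (a ^ j) M * a) M
            = PySem.Int.mod (a ^ (j + 1)) M := by
          rw [mod_mul_step M _ _ hM, pow_succ]
        simp only [chujAltGo, if_neg h, hstep, ih (j + 1)]
        constructor
        · rintro ⟨i, hi, hb⟩
          exact ⟨i + 1, by omega, by rw [show j + (i + 1) = j + 1 + i by omega]; exact hb⟩
        · rintro ⟨i, hi, hb⟩
          cases i with
          | zero => exact absurd (by simpa using hb) h
          | succ i =>
              exact ⟨i, by omega, by rw [show j + 1 + i = j + (i + 1) by omega]; exact hb⟩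

-- A's result as an existence statement
theorem chuj_iff (M a b : Int) :
    chuj M a b = true ↔ ∃ x ∈ PySem.List.pyRange 0 M 1, PySem.Int.mod (a ^ x.toNat) M = b := by
  simp only [chuj]
  rw [foldl_count_eq (fun x => PySem.Int.mod (a ^ x.toNat) M = b)]
  have := List.countP_pos_iff (p := fun x => decide (PySem.Int.mod (a ^ x.toNat) M = b))
    (l := PySem.List.pyRange 0 M 1)
  constructor
  · intro h
    have hk : 0 < (PySem.List.pyRange 0 M 1).countP
        (fun x => decide (PySem.Int.mod (a ^ x.toNat) M = b)) := by
      by_contra hc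
      simp [Nat.le_zero.mp (Nat.not_lt.mp hc)] at h
    obtain ⟨x, hx, hp⟩ := this.mp hk
    exact ⟨x, hx, of_decide_eq_true hp⟩
  · rintro ⟨x, hx, hp⟩
    simp
    exact ⟨x, PySem.List.mem_pyRange_one.mp hx, hp⟩

-- ===== VERDICT (by name: the statement is the Claim_ definition above) =====
theorem chuj_spec : Claim_equal_chuj := by
  intro M a b _
  unfold Spec_chuj chuj_alt
  by_cases hM : M ≤ 0
  · rw [if_pos hM]
    unfold chuj
    rw [PySem.List.pyRange_one_eq_nil hM]
    simp
  · have hM' : 0 < M := by omega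
    rw [if_neg hM]
    have h1 : PySem.Int.mod 1 M = PySem.Int.mod (a ^ 0) M := by simp
    rw [h1]
    rw [Bool.eq_iff_iff, chuj_iff, chujAltGo_iff M a b hM' M.toNat 0]
    constructor
    · rintro ⟨x, hx, hp⟩
      rw [PySem.List.mem_pyRange_one] at hx
      exact ⟨x.toNat, by omega, by simpa using hp⟩
    · rintro ⟨i, hi, hp⟩
      refine ⟨(i : Int), ?_, by simpa using hp⟩
      rw [PySem.List.mem_pyRange_one]
      constructor
      · exact_mod_cast Nat.zero_le i
      · omega
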